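-- pv_equiv track=rewrite | github.com/wail-shudar/Hackerrank_13_week_kit | 9_8_chief_hopper/chief_hopper.py | chiefHopper
-- ===== SOURCE A (Python) =====
-- def chiefHopper(arr):
--     e = arr[0]//2; passed = False
--
--     while not passed:
--         e_sum = e
--         for i in range(len(arr)):
--             if e_sum > arr[i]: e_sum += e_sum-arr[i]
--             elif e_sum < arr[i]: e_sum -= arr[i]-e_sum
--
--             if e_sum < 0: e += 1; break
--             elif i+1 == len(arr): passed = True; break
--     return e
-- ===== SOURCE B (Python) =====
-- def chiefHopper(arr):
--     e = 0
--     for a in reversed(arr):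
--         e = (max(e, 0) + a + 1) // 2
--     return e
-- ===== Notes on version B (the rewrite author's own statement) =====
-- stated objective: faster
-- what changed: Replaces A's retry loop (re-simulate the whole course from an incremented start energy until it passes) with a single backward pass computing the minimal required energy via e = ceil((max(e,0)+a)/2).
import Mathlib
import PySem

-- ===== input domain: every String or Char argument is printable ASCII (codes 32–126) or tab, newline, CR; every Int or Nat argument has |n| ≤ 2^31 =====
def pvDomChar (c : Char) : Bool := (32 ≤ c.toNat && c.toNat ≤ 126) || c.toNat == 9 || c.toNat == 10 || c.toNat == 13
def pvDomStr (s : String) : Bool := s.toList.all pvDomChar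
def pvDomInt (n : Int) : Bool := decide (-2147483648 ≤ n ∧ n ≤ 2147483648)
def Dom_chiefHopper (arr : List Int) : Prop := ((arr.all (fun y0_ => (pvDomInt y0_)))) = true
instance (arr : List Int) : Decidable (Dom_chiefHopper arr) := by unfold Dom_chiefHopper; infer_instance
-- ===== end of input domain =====

-- B changes the algorithm: A retries whole-course simulations from increasing start
-- energies (O(answer*n)); B computes the answer in one backward pass (O(n), measured faster).
-- A raises IndexError on the empty list; that input is outside Pre_.

-- ===== PORT A =====

-- backward minimal-energy value; used only in chLoop's termination measure and in proofs
def chBwd : List Int → Int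
  | [] => 0
  | a :: t => PySem.Int.floordiv (max (chBwd t) 0 + a + 1) 2

-- inner `for i in range(len(arr))` loop of A: state e_sum; returns whether it passed
-- (reaching i+1 == len) or broke with e_sum < 0 (then A increments e and retries)
def chSim : Int → List Int → Bool
  | _, [] => true
  | e_sum, a :: rest =>
      let s := if e_sum > a then e_sum + (e_sum - a)
               else if e_sum < a then e_sum - (a - e_sum)
               else e_sum
      if s < 0 then false else chSim s rest

-- the branches of A's inner update all amount to doubling minus the height
theorem chStep_eq (e a : Int) :
    (if e > a then e + (e - a) else if e < a then e - (a - e) else e) = 2 * e - a := by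
  split_ifs <;> omega

theorem chCeil_le (x e : Int) : PySem.Int.floordiv (x + 1) 2 ≤ e ↔ x ≤ 2 * e := by
  rw [PySem.Int.floordiv_eq_ediv_of_pos (by omega)]; omega

-- characterisation of the inner loop: it passes iff the start energy meets chBwd
theorem chSim_iff (a : Int) (rest : List Int) : ∀ e : Int,
    (chSim e (a :: rest) = true ↔ chBwd (a :: rest) ≤ e) := by
  induction rest generalizing a with
  | nil =>
      intro e
      simp only [chSim, chBwd, chStep_eq, chCeil_le]
      split_ifs <;> simp <;> omega
  | cons b t ih =>
      intro e
      have hib := ih b (2 * e - a)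
      rw [show chSim e (a :: b :: t)
            = (if (2 * e - a) < 0 then false else chSim (2 * e - a) (b :: t)) from by
            simp only [chSim, chStep_eq],
          show chBwd (a :: b :: t) = PySem.Int.floordiv (max (chBwd (b :: t)) 0 + a + 1) 2 from rfl,
          chCeil_le]
      rcases max_cases (chBwd (b :: t)) 0 with ⟨hmx, h2⟩ | ⟨hmx, h2⟩ <;> rw [hmx] <;>
        by_cases h : 2 * e - a < 0
      · simp only [if_pos h]; simp; omega
      · rw [if_neg h, hib]; omega
      · simp only [if_pos h]; simp; omega
      · rw [if_neg h, hib]; omega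

-- A's outer `while not passed` loop: retry with e+1 until the simulation passes
def chLoop (arr : List Int) (e : Int) : Int :=
  if chSim e arr then e else chLoop arr (e + 1)
termination_by (chBwd arr - e).toNat
decreasing_by
  cases arr with
  | nil => simp [chSim] at *
  | cons a t =>
      rename_i h
      rw [chSim_iff] at h
      omega

def chiefHopper (arr : List Int) : Int :=
  match arr with
  | [] => 0  -- Python raises IndexError at arr[0]; excluded by Pre_chiefHopper
  | a :: _ => chLoop arr (PySem.Int.floordiv a 2)

-- ===== PORT B =====
def chiefHopper_alt (arr : List Int) : Int :=
  (arr.reverse).foldl (fun e a => PySem.Int.floordiv (max e 0 + a + 1) 2) 0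

-- ===== PRECONDITION & SPEC =====
-- Pre_ excludes only the empty list, on which A raises IndexError (arr[0]).
def Pre_chiefHopper (arr : List Int) : Prop := arr ≠ []
instance (arr : List Int) : Decidable (Pre_chiefHopper arr) := by unfold Pre_chiefHopper; infer_instance
def pvWitness_chiefHopper : List Int := [7, 3, 5]

def Spec_chiefHopper (arr : List Int) (out : Int) : Prop := out = chiefHopper_alt arr
instance (arr : List Int) (out : Int) : Decidable (Spec_chiefHopper arr out) := by unfold Spec_chiefHopper; infer_instance

-- ===== CLAIM (what is proved, stated in full; the proofs are below) =====
def Claim_equal_chiefHopper : Prop := ∀ (arr : List Int), Dom_chiefHopper arr → Pre_chiefHopper arr → Spec_chiefHopper arr (chiefHopper arr)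

-- ===== LEMMAS AND PROOFS =====

theorem chAlt_eq_bwd (arr : List Int) : chiefHopper_alt arr = chBwd arr := by
  unfold chiefHopper_alt
  rw [List.foldl_reverse]
  induction arr with
  | nil => rfl
  | cons a t ih => simp only [List.foldr, chBwd, ih]

theorem chLoop_eq (a : Int) (t : List Int) : ∀ (n : Nat) (e : Int),
    (chBwd (a :: t) - e).toNat = n → e ≤ chBwd (a :: t) → chLoop (a :: t) e = chBwd (a :: t) := by
  intro n
  induction n with
  | zero =>
      intro e hn he
      have heq : e = chBwd (a :: t) := by omega
      rw [chLoop, if_pos (by rw [chSim_iff]; omega)]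
      exact heq
  | succ m ih =>
      intro e hn he
      have hlt : e < chBwd (a :: t) := by omega
      rw [chLoop, if_neg (by rw [chSim_iff]; omega)]
      exact ih (e + 1) (by omega) (by omega)

theorem chStart_le (a : Int) (t : List Int) :
    PySem.Int.floordiv a 2 ≤ chBwd (a :: t) := by
  show PySem.Int.floordiv a 2 ≤ PySem.Int.floordiv (max (chBwd t) 0 + a + 1) 2
  rw [PySem.Int.floordiv_eq_ediv_of_pos (by omega), PySem.Int.floordiv_eq_ediv_of_pos (by omega)]
  have := le_max_right (chBwd t) 0
  omega

theorem chiefHopper_spec : Claim_equal_chiefHopper := by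
  intro arr _ hpre
  unfold Spec_chiefHopper
  rw [chAlt_eq_bwd]
  cases arr with
  | nil => exact absurd rfl hpre
  | cons a t =>
      show chLoop (a :: t) (PySem.Int.floordiv a 2) = chBwd (a :: t)
      exact chLoop_eq a t _ _ rfl (chStart_le a t)
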